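-- pv_equiv track=rewrite | github.com/Aditya-Kaul/hybrid_ai_personalised_learning | new_test.py | dynamic_summarize
-- ===== SOURCE A (Python) =====
-- def dynamic_summarize(text: str, max_length: int = 500) -> str:
--     sentences = text.split('.')
--     summary = []
--     current_length = 0
--
--     for sentence in sentences:
--         if current_length + len(sentence) <= max_length:
--             summary.append(sentence)
--             current_length += len(sentence)
--         else:
--             break
--
--     return '. '.join(summary) + '.'
-- ===== SOURCE B (Python) =====
-- def dynamic_summarize(text: str, max_length: int = 500) -> str:
--     # prefix-sum table + count-of-fits + slice, instead of a mutable accumulator loop with break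
--     sentences = text.split('.')
--     total = 0
--     sums = [total := total + len(s) for s in sentences]
--     count = sum(v <= max_length for v in sums)
--     return '. '.join(sentences[:count]) + '.'
-- ===== Notes on version B (the rewrite author's own statement) =====
-- stated objective: alternative
-- what changed: Replaces the mutable-accumulator loop with early break by building the inclusive prefix-sum table of sentence lengths, counting how many entries fit (valid by monotonicity of the prefix sums), and slicing+joining that many sentences.
import Mathlib
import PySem

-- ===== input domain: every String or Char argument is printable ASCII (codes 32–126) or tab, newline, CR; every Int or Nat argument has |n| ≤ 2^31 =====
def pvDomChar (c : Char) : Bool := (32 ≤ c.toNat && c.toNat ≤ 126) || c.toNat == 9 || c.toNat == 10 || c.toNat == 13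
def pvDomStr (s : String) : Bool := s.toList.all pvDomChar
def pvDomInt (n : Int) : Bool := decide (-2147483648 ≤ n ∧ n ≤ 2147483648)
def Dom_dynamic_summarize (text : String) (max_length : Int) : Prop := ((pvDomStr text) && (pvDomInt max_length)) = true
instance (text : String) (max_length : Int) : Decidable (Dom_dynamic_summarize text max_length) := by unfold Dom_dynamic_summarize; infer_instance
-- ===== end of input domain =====

-- B builds the prefix-sum table of sentence lengths and counts the fitting entries, instead of A's accumulator loop with break; return values agree everywhere.

-- ===== PORT A =====
-- the for-loop with accumulator current_length and break
def pvALoop (max_length : Int) : List String → Int → List String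
  | [], _ => []
  | s :: rest, cur =>
    if cur + PySem.Str.len s ≤ max_length then
      s :: pvALoop max_length rest (cur + PySem.Str.len s)
    else []

def dynamic_summarize (text : String) (max_length : Int) : String :=
  let sentences := (PySem.Str.split? text ".").getD []
  PySem.Str.join ". " (pvALoop max_length sentences 0) ++ "."

-- ===== PORT B =====
-- inclusive running sums of sentence lengths (the assignment-expression comprehension in Source B)
def pvBSums (t : Int) : List String → List Int
  | [] => []
  | s :: rest => (t + PySem.Str.len s) :: pvBSums (t + PySem.Str.len s) rest

def dynamic_summarize_alt (text : String) (max_length : Int) : String :=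
  let sentences := (PySem.Str.split? text ".").getD []
  let sums := pvBSums 0 sentences
  let count := (sums.filter (fun v => decide (v ≤ max_length))).length
  PySem.Str.join ". " (sentences.take count) ++ "."

-- ===== PRECONDITION & SPEC =====
def Spec_dynamic_summarize (text : String) (max_length : Int) (out : String) : Prop := out = dynamic_summarize_alt text max_length
instance (text : String) (max_length : Int) (out : String) : Decidable (Spec_dynamic_summarize text max_length out) := by unfold Spec_dynamic_summarize; infer_instance

-- ===== CLAIM (what is proved, stated in full; the proofs are below) =====
def Claim_equal_dynamic_summarize : Prop := ∀ (text : String) (max_length : Int), Dom_dynamic_summarize text max_length → Spec_dynamic_summarize text max_length (dynamic_summarize text max_length)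

-- ===== LEMMAS AND PROOFS =====

-- every inclusive prefix sum starting at t is at least t (sentence lengths are nonnegative)
lemma pvBSums_le (l : List String) : ∀ t : Int, ∀ x ∈ pvBSums t l, t ≤ x := by
  induction l with
  | nil => intro t x hx; simp [pvBSums] at hx
  | cons s r ih =>
    intro t x hx
    simp only [pvBSums, List.mem_cons] at hx
    have h0 : (0 : Int) ≤ PySem.Str.len s := by
      simp [PySem.Str.len]
    rcases hx with rfl | hx
    · omega
    · have := ih (t + PySem.Str.len s) x hx; omega

-- A's break-loop takes exactly as many sentences as there are fitting prefix sums
lemma pvLoop_eq_take (l : List String) : ∀ t m : Int,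
    pvALoop m l t = l.take ((pvBSums t l).filter (fun v => decide (v ≤ m))).length := by
  induction l with
  | nil => intro t m; simp [pvALoop, pvBSums]
  | cons s r ih =>
    intro t m
    have hlen : PySem.Str.len s = (s.length : Int) := PySem.Str.len_eq s
    by_cases h : t + PySem.Str.len s ≤ m
    · have h' : t + (s.length : Int) ≤ m := by rw [hlen] at h; exact h
      simp [pvALoop, pvBSums, h']
      exact ih _ m
    · have hfil : (pvBSums t (s :: r)).filter (fun v => decide (v ≤ m)) = [] := by
        rw [List.filter_eq_nil_iff]
        intro x hx
        have hx' := pvBSums_le (s :: r) t x hx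
        have : ¬ x ≤ m := by
          simp only [pvBSums, List.mem_cons] at hx
          rcases hx with rfl | hx
          · exact h
          · have := pvBSums_le r (t + PySem.Str.len s) x hx; omega
        simpa using this
      have h' : ¬ t + (s.length : Int) ≤ m := by rw [hlen] at h; exact h
      simp [pvALoop, hfil]
      omega

-- ===== VERDICT (by name: the statement is the Claim_ definition above) =====
theorem dynamic_summarize_spec : Claim_equal_dynamic_summarize := by
  intro text max_length _
  unfold Spec_dynamic_summarize dynamic_summarize dynamic_summarize_alt
  simp only []
  rw [pvLoop_eq_take]
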